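-- pv_equiv track=rewrite | github.com/ayushman-j/Cryptanalysis-of-Monoalphabetic-Cipher-using-SAT-Solver | cnf_solver_driver.py | token_pattern
-- ===== SOURCE A (Python) =====
-- def token_pattern(word):
--     # produce pattern like ABCA for word "NOON" -> 0 1 2 2? but we want letter-equality pattern
--     # We'll produce pattern with numbers: first new letter gets next number
--     mapping = {}
--     pat = []
--     next_id = 0
--     for ch in word:
--         if ch not in mapping:
--             mapping[ch] = next_id
--             next_id += 1
--         pat.append(mapping[ch])
--     return tuple(pat)
-- ===== SOURCE B (Python) =====
-- def token_pattern(word):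
--     # A letter's id is the number of distinct letters occurring strictly before its
--     # first occurrence: compute that directly per distinct letter via a prefix slice
--     # and a set cardinality, instead of A's incremental next_id counter.
--     rank = {ch: len(set(word[:word.index(ch)])) for ch in set(word)}
--     return tuple(rank[ch] for ch in word)
-- ===== Notes on version B (the rewrite author's own statement) =====
-- stated objective: alternative
-- what changed: A assigns consecutive ids on the fly with a mutable counter; B computes each letter's id non-incrementally as the number of distinct letters in the prefix before that letter's first occurrence (len(set(word[:word.index(ch)]))), correct because ids are handed out in first-appearance order.
import Mathlib
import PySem

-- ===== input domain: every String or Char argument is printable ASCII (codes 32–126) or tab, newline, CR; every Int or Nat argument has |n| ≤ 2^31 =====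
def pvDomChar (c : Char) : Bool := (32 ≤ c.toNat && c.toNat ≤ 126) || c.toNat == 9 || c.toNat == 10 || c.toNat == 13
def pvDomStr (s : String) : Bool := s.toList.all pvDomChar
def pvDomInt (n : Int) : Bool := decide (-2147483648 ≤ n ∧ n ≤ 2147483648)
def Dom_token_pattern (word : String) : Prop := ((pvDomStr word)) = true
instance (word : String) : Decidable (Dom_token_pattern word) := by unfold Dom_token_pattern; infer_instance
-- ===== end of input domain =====

-- B replaces A's on-the-fly id counter by a direct, non-incremental definition: a letter's
-- id is the number of distinct letters in the prefix before its first occurrence (alternative algorithm, same return value).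

-- ===== PORT A =====
-- mapping = {}; pat = []; next_id = 0; for ch in word: …; return tuple(pat)
def token_pattern (word : String) : List Int :=
  (word.toList.foldl
    (fun (st : PySem.Dict Char Int × List Int × Int) ch =>
      let st1 :=
        if st.1.contains ch then st
        else (st.1.insert ch st.2.2, st.2.1, st.2.2 + 1)
      (st1.1, st1.2.1 ++ [st1.1.getD ch 0], st1.2.2))
    (PySem.Dict.empty, [], 0)).2.1

-- ===== PORT B =====
-- rank = {ch: len(set(word[:word.index(ch)])) for ch in set(word)}; tuple(rank[ch] for ch in word)
-- word.index(ch) = first index of ch (exact: ch ∈ word, so Python's index returns, never raises);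
-- word[:i] with 0 ≤ i ≤ len(word) is take i; set(…) is PySem.Set.ofList.
def token_pattern_alt (word : String) : List Int :=
  let wl := word.toList
  let rank : PySem.Dict Char Int :=
    PySem.Dict.ofList ((PySem.Set.ofList wl).map
      (fun ch => (ch, ((PySem.Set.ofList (wl.take (wl.idxOf ch))).length : Int))))
  wl.map (fun ch => rank.getD ch 0)

-- ===== PRECONDITION & SPEC =====
def Spec_token_pattern (word : String) (out : List Int) : Prop := out = token_pattern_alt word
instance (word : String) (out : List Int) : Decidable (Spec_token_pattern word out) := by unfold Spec_token_pattern; infer_instance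

-- ===== CLAIM (what is proved, stated in full; the proofs are below) =====
def Claim_equal_token_pattern : Prop := ∀ (word : String), Dom_token_pattern word → Spec_token_pattern word (token_pattern word)

-- ===== LEMMAS AND PROOFS =====

-- Set.update appends to the right
lemma update_eq_append (l s : List Char) : ∃ r, PySem.Set.update s l = s ++ r := by
  induction l generalizing s with
  | nil => exact ⟨[], by simp [PySem.Set.update]⟩
  | cons c t ih =>
    have h1 : PySem.Set.update s (c :: t) = PySem.Set.update (PySem.Set.add s c) t := rfl
    obtain ⟨r, hr⟩ := ih (PySem.Set.add s c)
    by_cases hc : c ∈ s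
    · exact ⟨r, by rw [h1, hr]; simp [PySem.Set.add, PySem.Set.contains, hc]⟩
    · exact ⟨c :: r, by rw [h1, hr]; simp [PySem.Set.add, PySem.Set.contains, hc]⟩

-- A's loop invariant: the dict maps each seen char to its index in the seen-set
lemma A_loop (l : List Char) (s : List Char) (M : PySem.Dict Char Int) (acc : List Int)
    (HM : ∀ c, M.get? c = if c ∈ s then some ((s.idxOf c : Int)) else none) :
    (l.foldl
      (fun (st : PySem.Dict Char Int × List Int × Int) ch =>
        let st1 :=
          if st.1.contains ch then st
          else (st.1.insert ch st.2.2, st.2.1, st.2.2 + 1)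
        (st1.1, st1.2.1 ++ [st1.1.getD ch 0], st1.2.2))
      (M, acc, (s.length : Int))).2.1
    = acc ++ l.map (fun c => (((PySem.Set.update s l).idxOf c : Nat) : Int)) := by
  induction l generalizing s M acc with
  | nil => simp [PySem.Set.update]
  | cons c t ih =>
    have hcont : M.contains c = decide (c ∈ s) := by
      rw [PySem.Dict.contains_eq_isSome_get?, HM c]
      by_cases hc : c ∈ s <;> simp [hc]
    have hupd : PySem.Set.update s (c :: t) = PySem.Set.update (PySem.Set.add s c) t := rfl
    by_cases hc : c ∈ s
    · -- seen before: state unchanged, id is idxOf in s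
      have hadd : PySem.Set.add s c = s := by
        simp [PySem.Set.add, PySem.Set.contains, hc]
      have hgetD : M.getD c 0 = (s.idxOf c : Int) := by
        rw [PySem.Dict.getD_eq_get?_getD, HM c]; simp [hc]
      simp only [List.foldl_cons, hcont, hc, decide_true, if_true, hgetD]
      rw [ih s M (acc ++ [(s.idxOf c : Int)]) HM]
      obtain ⟨r, hr⟩ := update_eq_append t s
      rw [hupd, hadd, List.map_cons, hr, List.idxOf_append_of_mem hc]
      simp
    · -- new char: insert with id = s.length
      have hadd : PySem.Set.add s c = s ++ [c] := by
        simp [PySem.Set.add, PySem.Set.contains, hc]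
      have hidxc : (s ++ [c]).idxOf c = s.length := by
        simp [List.idxOf_append, hc]
      have HM' : ∀ c', (M.insert c (s.length : Int)).get? c'
          = if c' ∈ s ++ [c] then some (((s ++ [c]).idxOf c' : Nat) : Int) else none := by
        intro c'
        rw [PySem.Dict.get?_insert]
        by_cases he : c' = c
        · subst he; simp [hidxc]
        · rw [if_neg he, HM c']
          by_cases hs : c' ∈ s
          · simp [hs, List.idxOf_append_of_mem hs, he]
          · have : c' ∉ s ++ [c] := by simp [hs, he]
            simp [hs, this]
      have hgetD : (M.insert c (s.length : Int)).getD c 0 = (s.length : Int) := by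
        rw [PySem.Dict.getD_eq_get?_getD, PySem.Dict.get?_insert]; simp
      have hlen : ((s.length : Int) + 1) = (((s ++ [c]).length : Nat) : Int) := by
        simp
      simp only [List.foldl_cons, hcont, hc, decide_false, Bool.false_eq_true, if_false, hgetD,
        hlen]
      rw [ih (s ++ [c]) (M.insert c (s.length : Int)) (acc ++ [(s.length : Int)]) HM']
      obtain ⟨r, hr⟩ := update_eq_append t (s ++ [c])
      rw [hupd, hadd, List.map_cons, hr,
        List.idxOf_append_of_mem (by simp : c ∈ s ++ [c]), hidxc]
      simp

-- an element already seen keeps its index through the rest of the scan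
lemma idxOf_update_of_mem (l : List Char) (s : List Char) (c : Char) (hc : c ∈ s) :
    (PySem.Set.update s l).idxOf c = s.idxOf c := by
  obtain ⟨r, hr⟩ := update_eq_append l s
  rw [hr, List.idxOf_append_of_mem hc]

-- the position of a fresh char in the final seen-set is the number of distinct chars
-- scanned before its first occurrence
lemma idxOf_update_take (l : List Char) : ∀ (s : List Char) (c : Char), c ∉ s → c ∈ l →
    (PySem.Set.update s l).idxOf c = (PySem.Set.update s (l.take (l.idxOf c))).length := by
  induction l with
  | nil => intro s c _ h; exact absurd h (List.not_mem_nil)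
  | cons a t ih =>
    intro s c hcs hcl
    have hupd : PySem.Set.update s (a :: t) = PySem.Set.update (PySem.Set.add s a) t := rfl
    by_cases he : c = a
    · subst he
      have hadd : PySem.Set.add s c = s ++ [c] := by
        simp [PySem.Set.add, PySem.Set.contains, hcs]
      rw [hupd, idxOf_update_of_mem t _ c (by rw [hadd]; simp), hadd,
        List.idxOf_append_of_notMem hcs]
      simp [PySem.Set.update]
    · have hct : c ∈ t := by
        rcases List.mem_cons.1 hcl with h | h
        · exact absurd h he
        · exact h
      have hcs' : c ∉ PySem.Set.add s a := by
        by_cases ha : a ∈ s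
        · simpa [PySem.Set.add, PySem.Set.contains, ha] using hcs
        · simp [PySem.Set.add, PySem.Set.contains, ha, hcs, he]
      have hidx : (a :: t).idxOf c = t.idxOf c + 1 := by
        simp [Ne.symm he]
      rw [hupd, ih (PySem.Set.add s a) c hcs' hct, hidx]
      rfl

-- B's rank table looks up the stored value for each distinct char
lemma B_lookup (D : List Char) (f : Char → Int) (c : Char) (hnd : D.Nodup) (hc : c ∈ D) :
    (PySem.Dict.ofList (D.map (fun ch => (ch, f ch)))).getD c 0 = f c := by
  have hfold : PySem.Dict.ofList (D.map (fun ch => (ch, f ch)))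
      = D.foldl (fun d ch => d.insert ch (f ch)) PySem.Dict.empty := by
    show (D.map (fun ch => (ch, f ch))).foldl (fun d p => d.insert p.1 p.2) PySem.Dict.empty = _
    rw [List.foldl_map]
  have hitems : (D.foldl (fun d ch => d.insert ch (f ch)) PySem.Dict.empty).items
      = PySem.Dict.empty.items ++ D.map (fun ch => (ch, f ch)) :=
    PySem.Dict.items_foldl_insert_fresh D id f PySem.Dict.empty
      (fun a _ => PySem.Dict.contains_empty a) (by simpa using hnd)
  have hknd : (D.foldl (fun d ch => d.insert ch (f ch)) PySem.Dict.empty).keys.Nodup :=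
    PySem.Dict.nodup_keys_foldl_insert_key D _ _ PySem.Dict.empty PySem.Dict.nodup_keys_empty
  have hmem : (c, f c) ∈ D.map (fun ch => (ch, f ch)) := List.mem_map.2 ⟨c, hc, rfl⟩
  rw [hfold]
  exact PySem.Dict.getD_of_mem_items _ (by rw [hitems]; exact List.mem_append_right _ hmem) hknd 0

-- ===== VERDICT (by name: the statement is the Claim_ definition above) =====
theorem token_pattern_spec : Claim_equal_token_pattern := by
  intro word _
  unfold Spec_token_pattern token_pattern token_pattern_alt
  have h := A_loop word.toList [] PySem.Dict.empty [] (by simp [PySem.Dict.get?_empty])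
  simp only [List.length_nil, Nat.cast_zero, List.nil_append] at h
  rw [h]
  apply List.map_congr_left
  intro c hc
  rw [B_lookup (PySem.Set.ofList word.toList) _ c (PySem.Set.nodup_ofList _)
    ((PySem.Set.mem_ofList _ c).2 hc)]
  rw [idxOf_update_take word.toList [] c (List.not_mem_nil) hc, PySem.Set.update_nil_left]
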